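-- pv_equiv track=rewrite | github.com/yubocai-poly/-Design-and-Analysis-of-Algorithms | midterm2020/loglog.py | zeros
-- ===== SOURCE A (Python) =====
-- def zeros(bina, b):
--     # return the largest l, called b-length of bina, such that all entries in bina[b:b+l] are zeros
--     if len(bina) == 0:
--         return None
--     l = 0
--     n = len(bina)
--     while b + l < n and bina[b + l] == '0':
--         l += 1
--     return l
-- ===== SOURCE B (Python) =====
-- def zeros(bina, b):
--     # Count leading '0's of the suffix bina[b:] via slice + lstrip
--     # instead of indexing character by character.
--     if len(bina) == 0:
--         return None
--     rest = bina[b:]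
--     return len(rest) - len(rest.lstrip('0'))
-- ===== Notes on version B (the rewrite author's own statement) =====
-- stated objective: idiomatic
-- what changed: Replaces the per-character while loop with a slice-plus-lstrip computation (len(rest) - len(rest.lstrip('0'))) on the suffix bina[b:].
-- intended difference: For negative b in [-len(bina),-1] whose suffix bina[b:] is all zeros while bina also starts with '0', A's negative-index wraparound keeps counting past the end of the string into its beginning (e.g. zeros('00',-1)=3), whereas B returns the length of the zero run actually starting at index b (1), which is the intended count. — e.g. on zeros("00", -1): A returns some 3, B returns some 1
import Mathlib
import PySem

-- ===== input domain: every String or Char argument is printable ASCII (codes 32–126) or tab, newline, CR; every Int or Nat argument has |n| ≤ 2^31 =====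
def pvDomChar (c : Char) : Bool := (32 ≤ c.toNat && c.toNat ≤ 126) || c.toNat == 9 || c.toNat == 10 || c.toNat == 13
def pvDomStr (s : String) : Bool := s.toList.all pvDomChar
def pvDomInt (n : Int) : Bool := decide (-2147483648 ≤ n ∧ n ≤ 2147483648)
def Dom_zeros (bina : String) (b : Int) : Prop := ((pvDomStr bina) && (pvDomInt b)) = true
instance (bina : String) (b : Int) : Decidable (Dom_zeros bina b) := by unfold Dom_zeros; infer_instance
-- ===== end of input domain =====

-- B replaces A's per-character while loop by slice-plus-lstrip (leading-zero count of bina[b:]);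
-- equivalence is claimed outside D_zeros (A's negative-index wraparound corner) and Pre_ excludes A's IndexError inputs.

-- ===== PORT A =====
-- the while loop 'while b + l < n and bina[b+l] == "0": l += 1'; fuel (n - b).toNat bounds the
-- iteration count (each step needs b + l < n with l increasing from 0), it only makes the loop total
def zerosLoop (cs : List Char) (n b : Int) : Nat → Int → Int
  | 0, l => l
  | fuel + 1, l =>
    if b + l < n ∧ PySem.List.pyGet? cs (b + l) = some '0' then
      zerosLoop cs n b fuel (l + 1)
    else l

def zeros (bina : String) (b : Int) : Option Int :=
  if bina.toList.length = 0 then none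
  else some (zerosLoop bina.toList bina.toList.length b ((bina.toList.length - b).toNat) 0)

-- ===== PORT B =====
def zeros_alt (bina : String) (b : Int) : Option Int :=
  if bina.toList.length = 0 then none
  else
    -- rest = bina[b:]; rest.lstrip('0') is ported by hand as dropWhile (· == '0'):
    -- exact, since the strip set is the single char '0'
    some (((PySem.List.slice bina.toList (some b) none).length : Int)
      - (((PySem.List.slice bina.toList (some b) none).dropWhile (· == '0')).length : Int))

-- ===== PRECONDITION & SPEC =====
-- Pre_ excludes exactly the inputs where A raises IndexError: non-empty bina with b < -len(bina).
def Pre_zeros (bina : String) (b : Int) : Prop :=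
  bina.toList = [] ∨ -(bina.toList.length : Int) ≤ b

instance (bina : String) (b : Int) : Decidable (Pre_zeros bina b) := by
  unfold Pre_zeros; infer_instance

def pvWitness_zeros : String × Int := ("0010", 1)

-- For negative b in [-len(bina),-1] whose suffix bina[b:] is all zeros while bina also starts with
-- '0', A's negative-index wraparound keeps counting past the end of the string into its beginning
-- (e.g. zeros('00',-1)=3), whereas B returns the length of the zero run actually starting at index
-- b (1), which is the intended count.
def D_zeros (bina : String) (b : Int) : Prop :=
  bina.toList ≠ [] ∧ b < 0 ∧ -(bina.toList.length : Int) ≤ b ∧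
  (bina.toList.drop ((bina.toList.length : Int) + b).toNat).all (· == '0') = true ∧
  bina.toList.head? = some '0'

instance (bina : String) (b : Int) : Decidable (D_zeros bina b) := by
  unfold D_zeros; infer_instance

def Spec_zeros (bina : String) (b : Int) (out : Option Int) : Prop :=
  ¬ D_zeros bina b → out = zeros_alt bina b
instance (bina : String) (b : Int) (out : Option Int) : Decidable (Spec_zeros bina b out) := by
  unfold Spec_zeros; infer_instance

def pvDiffWitness_zeros : String × Int := ("00", -1)
def pvDiffWitnessOut_zeros : (Option Int) × (Option Int) := (some 3, some 1)

-- ===== CLAIM (what is proved, stated in full; the proofs are below) =====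
def Claim_unchanged_zeros : Prop := ∀ (bina : String) (b : Int), Dom_zeros bina b → Pre_zeros bina b → Spec_zeros bina b (zeros bina b)
def Claim_changed_zeros : Prop := Dom_zeros (pvDiffWitness_zeros.1) (pvDiffWitness_zeros.2) ∧ Pre_zeros (pvDiffWitness_zeros.1) (pvDiffWitness_zeros.2) ∧ D_zeros (pvDiffWitness_zeros.1) (pvDiffWitness_zeros.2) ∧ zeros (pvDiffWitness_zeros.1) (pvDiffWitness_zeros.2) = pvDiffWitnessOut_zeros.1 ∧ zeros_alt (pvDiffWitness_zeros.1) (pvDiffWitness_zeros.2) = pvDiffWitnessOut_zeros.2 ∧ pvDiffWitnessOut_zeros.1 ≠ pvDiffWitnessOut_zeros.2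
def Claim_exact_zeros : Prop := ∀ (bina : String) (b : Int), Dom_zeros bina b → Pre_zeros bina b → D_zeros bina b → zeros bina b ≠ zeros_alt bina b

-- ===== LEMMAS AND PROOFS =====

-- A's loop counts leading '0's of the "scan window" W, provided W mirrors A's index sequence.
lemma zerosLoop_spec (cs : List Char) (b : Int) (W : List Char)
    (hlen : W.length = ((cs.length : Int) - b).toNat)
    (hget : ∀ m : Nat, (hm : m < W.length) → PySem.List.pyGet? cs (b + m) = some W[m]) :
    ∀ (fuel : Nat) (l : Int), 0 ≤ l → ((cs.length : Int) - (b + l)).toNat ≤ fuel →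
      zerosLoop cs cs.length b fuel l
        = l + ((W.drop l.toNat).takeWhile (· == '0')).length := by
  intro fuel
  induction fuel with
  | zero =>
    intro l hl hfuel
    have : W.length ≤ l.toNat := by omega
    simp [zerosLoop, List.drop_eq_nil_of_le this]
  | succ fuel ih =>
    intro l hl hfuel
    by_cases hcond : b + l < (cs.length : Int) ∧ PySem.List.pyGet? cs (b + l) = some '0'
    · have hlW : l.toNat < W.length := by omega
      have hbl : b + l = b + (l.toNat : Int) := by omega
      have hg := hget l.toNat hlW
      rw [hbl] at hcond
      have hW0 : W[l.toNat] = '0' := Option.some_injective _ (hg.symm.trans hcond.2)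
      have hdrop : W.drop l.toNat = W[l.toNat] :: W.drop (l.toNat + 1) :=
        List.drop_eq_getElem_cons hlW
      have step : zerosLoop cs cs.length b (fuel + 1) l = zerosLoop cs cs.length b fuel (l + 1) := by
        simp only [zerosLoop]
        rw [if_pos (by rw [hbl]; exact hcond)]
      rw [step, ih (l + 1) (by omega) (by omega), hdrop, hW0]
      have h1 : ((l + 1 : Int)).toNat = l.toNat + 1 := by omega
      simp [h1]
      omega
    · have step : zerosLoop cs cs.length b (fuel + 1) l = l := by
        simp only [zerosLoop]
        rw [if_neg hcond]
      rw [step]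
      by_cases hbound : b + l < (cs.length : Int)
      · have hlW : l.toNat < W.length := by omega
        have hbl : b + l = b + (l.toNat : Int) := by omega
        have hg := hget l.toNat hlW
        rw [hbl] at hcond
        have hW0 : (W[l.toNat] == '0') = false := by
          rcases Decidable.not_and_iff_or_not.mp hcond with h | h
          · omega
          · simp only [beq_eq_false_iff_ne, ne_eq]
            intro hc; exact h (by rw [hg, hc])
        have hdrop : W.drop l.toNat = W[l.toNat] :: W.drop (l.toNat + 1) :=
          List.drop_eq_getElem_cons hlW
        rw [hdrop]
        simp [hW0]
      · have : W.length ≤ l.toNat := by omega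
        simp [List.drop_eq_nil_of_le this]

-- B's arithmetic equals the takeWhile length.
lemma alt_count (rest : List Char) :
    ((rest.length : Int) - ((rest.dropWhile (· == '0')).length : Int))
      = ((rest.takeWhile (· == '0')).length : Int) := by
  have h := congrArg List.length (List.takeWhile_append_dropWhile (p := (· == '0')) (l := rest))
  rw [List.length_append] at h
  omega

lemma clampIdx_nonneg (n : Nat) (b : Int) (hb : 0 ≤ b) :
    PySem.List.clampIdx n b = min b.toNat n := by
  unfold PySem.List.clampIdx
  rw [if_neg (by omega)]

lemma clampIdx_neg (n : Nat) (b : Int) (hb : b < 0) (hb' : -(n : Int) ≤ b) :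
    PySem.List.clampIdx n b = ((n : Int) + b).toNat := by
  unfold PySem.List.clampIdx
  rw [if_pos hb, if_neg (by omega)]

lemma drop_min (cs : List Char) (k : Nat) : cs.drop (min k cs.length) = cs.drop k := by
  by_cases h : k ≤ cs.length
  · rw [min_eq_left h]
  · rw [min_eq_right (by omega), List.drop_length, List.drop_eq_nil_of_le (by omega)]

lemma tw_eq_self_of_all (l : List Char) (h : l.all (· == '0') = true) :
    l.takeWhile (· == '0') = l := by
  induction l with
  | nil => rfl
  | cons a l ih =>
    rw [List.all_cons, Bool.and_eq_true] at h
    rw [List.takeWhile_cons, if_pos h.1, ih h.2]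

lemma all_of_tw_length (l : List Char) (h : (l.takeWhile (· == '0')).length = l.length) :
    l.all (· == '0') = true := by
  induction l with
  | nil => rfl
  | cons a l ih =>
    rw [List.takeWhile_cons] at h
    by_cases ha : (a == '0') = true
    · rw [if_pos ha] at h
      rw [List.all_cons, ha, Bool.true_and]
      exact ih (by simpa using h)
    · rw [if_neg ha] at h
      simp at h

-- the nonnegative case: A's scan window is exactly the suffix cs.drop b.toNat
lemma zeros_eq_takeWhile_nonneg (cs : List Char) (b : Int) (hb : 0 ≤ b) :
    zerosLoop cs cs.length b (((cs.length : Int) - b).toNat) 0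
      = (((cs.drop b.toNat).takeWhile (· == '0')).length : Int) := by
  have h := zerosLoop_spec cs b (cs.drop b.toNat)
    (by simp [List.length_drop]; omega)
    (by
      intro m hm
      have hlt : b.toNat + m < cs.length := by
        simp [List.length_drop] at hm; omega
      have hcast : b + (m : Int) = ((b.toNat + m : Nat) : Int) := by omega
      rw [hcast, PySem.List.pyGet?_natCast]
      simp [List.getElem?_eq_getElem hlt])
    (((cs.length : Int) - b).toNat) 0 le_rfl (by omega)
  simpa using h

-- the in-range negative case: A's scan window is (suffix of length -b) ++ cs (index wraparound)
lemma zeros_eq_takeWhile_neg (cs : List Char) (b : Int) (hb : b < 0)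
    (hb' : -(cs.length : Int) ≤ b) :
    zerosLoop cs cs.length b (((cs.length : Int) - b).toNat) 0
      = ((((cs.drop ((cs.length : Int) + b).toNat) ++ cs).takeWhile (· == '0')).length : Int) := by
  set j : Nat := ((cs.length : Int) + b).toNat with hj
  have hjlen : j ≤ cs.length := by omega
  have hsuf : (cs.drop j).length = cs.length - j := by simp [List.length_drop]
  have hWlen : (cs.drop j ++ cs).length = (cs.length - j) + cs.length := by
    rw [List.length_append, hsuf]
  have h := zerosLoop_spec cs b (cs.drop j ++ cs)
    (by rw [hWlen]; omega)
    (by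
      intro m hm
      have hmN : m < (cs.length - j) + cs.length := by rw [hWlen] at hm; exact hm
      by_cases hneg : (m : Int) < -b
      · -- negative index: bina[b+m] wraps to cs[len + b + m]
        have hk1 : 0 < (-(b + m)).toNat := by omega
        have hk2 : (-(b + m)).toNat ≤ cs.length := by omega
        have hcast : b + (m : Int) = -(((-(b + m)).toNat : Nat) : Int) := by omega
        rw [hcast, PySem.List.pyGet?_neg_natCast _ _ hk1 hk2]
        have hidx : cs.length - (-(b + m)).toNat = j + m := by omega
        rw [hidx]
        have hjm : j + m < cs.length := by omega
        rw [List.getElem?_eq_getElem hjm]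
        have hmfst : m < (cs.drop j).length := by omega
        rw [List.getElem_append_left hmfst]
        simp
      · -- nonnegative index: bina[b+m] = cs[b+m]
        have hlt : (b + (m : Int)).toNat < cs.length := by omega
        have hcast : b + (m : Int) = (((b + (m : Int)).toNat : Nat) : Int) := by omega
        rw [hcast, PySem.List.pyGet?_natCast, List.getElem?_eq_getElem hlt]
        have hge : (cs.drop j).length ≤ m := by omega
        have hidx2 : (b + (m : Int)).toNat = m - (cs.drop j).length := by omega
        rw [List.getElem_append_right hge]
        simp only [hidx2])
    (((cs.length : Int) - b).toNat) 0 le_rfl (by omega)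
  simpa using h

-- takeWhile over the wrapped window agrees with takeWhile of the suffix unless the suffix is
-- all-'0' and cs itself starts with '0'
lemma takeWhile_window (suf cs : List Char)
    (h : ¬ ((suf.all (· == '0') = true) ∧ cs.head? = some '0')) :
    ((suf ++ cs).takeWhile (· == '0')).length = (suf.takeWhile (· == '0')).length := by
  rw [List.takeWhile_append]
  by_cases hall : (suf.takeWhile (· == '0')).length = suf.length
  · rw [if_pos hall]
    have hsufall : suf.all (· == '0') = true := all_of_tw_length suf hall
    cases cs with
    | nil => simpa [tw_eq_self_of_all suf hsufall] using hall
    | cons c cs' =>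
      have hcne : (c == '0') = false := by
        simp only [beq_eq_false_iff_ne, ne_eq]
        intro hc0
        exact h ⟨hsufall, by rw [hc0]; rfl⟩
      rw [List.takeWhile_cons, if_neg (by simp [hcne])]
      simpa [tw_eq_self_of_all suf hsufall] using hall
  · rw [if_neg hall]

-- inside D_, the wrapped window strictly over-counts
lemma takeWhile_window_gt (suf cs : List Char)
    (hall : suf.all (· == '0') = true) (hhd : cs.head? = some '0') :
    (suf.takeWhile (· == '0')).length < ((suf ++ cs).takeWhile (· == '0')).length := by
  rw [List.takeWhile_append, tw_eq_self_of_all suf hall, if_pos rfl, List.length_append]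
  cases cs with
  | nil => simp at hhd
  | cons c cs' =>
    have hc : c = '0' := by simpa using hhd
    rw [List.takeWhile_cons, if_pos (by simp [hc])]
    simp

-- common unfolding of both ports on a non-empty string
lemma ports_unfold (bina : String) (b : Int) (hne : bina.toList.length ≠ 0) :
    zeros bina b = some (zerosLoop bina.toList bina.toList.length b
        (((bina.toList.length : Int) - b).toNat) 0)
    ∧ zeros_alt bina b = some
        (((PySem.List.slice bina.toList (some b) none).takeWhile (· == '0')).length : Int) := by
  constructor
  · unfold zeros
    rw [if_neg hne]
  · unfold zeros_alt
    rw [if_neg hne, alt_count]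

-- ===== VERDICT (by name: the statement is the Claim_ definition above) =====
theorem zeros_spec : Claim_unchanged_zeros := by
  intro bina b _ hpre hnD
  show zeros bina b = zeros_alt bina b
  by_cases hnil : bina.toList.length = 0
  · unfold zeros zeros_alt
    rw [if_pos hnil, if_pos hnil]
  · obtain ⟨hA, hB⟩ := ports_unfold bina b hnil
    rw [hA, hB, PySem.List.slice_some_none]
    by_cases hb : 0 ≤ b
    · rw [clampIdx_nonneg _ _ hb, drop_min, zeros_eq_takeWhile_nonneg _ _ hb]
    · have hb' : -(bina.toList.length : Int) ≤ b := by
        rcases hpre with hp | hp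
        · exact absurd hp (by intro h; exact hnil (by rw [h]; rfl))
        · exact hp
      rw [clampIdx_neg _ _ (by omega) hb', zeros_eq_takeWhile_neg _ _ (by omega) hb']
      congr 1
      exact_mod_cast takeWhile_window _ _ (fun hD => hnD
        ⟨by intro h; exact hnil (by rw [h]; rfl), by omega, hb', hD.1, hD.2⟩)

theorem zeros_changed : Claim_changed_zeros := by
  unfold Claim_changed_zeros; decide

theorem zeros_tight : Claim_exact_zeros := by
  intro bina b _ _ hD
  obtain ⟨hne, hbneg, hblb, hall, hhd⟩ := hD
  have hnil : bina.toList.length ≠ 0 := by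
    intro h; exact hne (List.length_eq_zero_iff.mp h)
  obtain ⟨hA, hB⟩ := ports_unfold bina b hnil
  rw [hA, hB, PySem.List.slice_some_none, clampIdx_neg _ _ hbneg hblb,
    zeros_eq_takeWhile_neg _ _ hbneg hblb]
  intro hceq
  have := Option.some_injective _ hceq
  have hlt := takeWhile_window_gt (bina.toList.drop ((bina.toList.length : Int) + b).toNat)
    bina.toList hall hhd
  omega
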